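-- pv_equiv track=rewrite | github.com/hackeshackes/ai-platform | backend/core/cross_domain/transfer_learning.py | _adapt_fact
-- ===== SOURCE A (Python) =====
-- from typing import Dict, List, Any, Optional, Tuple, Callable
--
-- def _adapt_fact(
--
--     fact: Dict[str, Any],
--     source_features: Dict[str, Any],
--     target_features: Dict[str, Any]
-- ) -> Dict[str, Any]:
--     """适配事实"""
--     adapted_fact = fact.copy()
--
--     # 更新特征名
--     new_fact = {}
--     for key, value in adapted_fact.items():
--         if key in source_features and len(target_features) > list(source_features.keys()).index(key):
--             new_key = list(target_features.keys())[list(source_features.keys()).index(key)]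
--             new_fact[new_key] = value
--         else:
--             new_fact[key] = value
--
--     return new_fact
-- ===== SOURCE B (Python) =====
-- def _adapt_fact(fact, source_features, target_features):
--     """适配事实"""
--     original_keys = list(fact)
--     new_keys = list(fact)
--     for src_key, tgt_key in zip(source_features, target_features):
--         if src_key in fact:
--             new_keys[original_keys.index(src_key)] = tgt_key
--     return dict(zip(new_keys, fact.values()))
-- ===== Notes on version B (the rewrite author's own statement) =====
-- stated objective: faster
-- what changed: Inverts the traversal: instead of A's per-fact-key rename via membership test plus a rebuilt list(source_features.keys()).index() scan inside the loop, B iterates once over the zipped feature pairs, patching a mutable key array in place at each source key's position (zip truncation encodes A's length guard), then rebuilds the dict by zipping the patched keys with the values; Pre_ only excludes association lists with duplicate fact or source keys, which do not represent any Python dict.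
import Mathlib
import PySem

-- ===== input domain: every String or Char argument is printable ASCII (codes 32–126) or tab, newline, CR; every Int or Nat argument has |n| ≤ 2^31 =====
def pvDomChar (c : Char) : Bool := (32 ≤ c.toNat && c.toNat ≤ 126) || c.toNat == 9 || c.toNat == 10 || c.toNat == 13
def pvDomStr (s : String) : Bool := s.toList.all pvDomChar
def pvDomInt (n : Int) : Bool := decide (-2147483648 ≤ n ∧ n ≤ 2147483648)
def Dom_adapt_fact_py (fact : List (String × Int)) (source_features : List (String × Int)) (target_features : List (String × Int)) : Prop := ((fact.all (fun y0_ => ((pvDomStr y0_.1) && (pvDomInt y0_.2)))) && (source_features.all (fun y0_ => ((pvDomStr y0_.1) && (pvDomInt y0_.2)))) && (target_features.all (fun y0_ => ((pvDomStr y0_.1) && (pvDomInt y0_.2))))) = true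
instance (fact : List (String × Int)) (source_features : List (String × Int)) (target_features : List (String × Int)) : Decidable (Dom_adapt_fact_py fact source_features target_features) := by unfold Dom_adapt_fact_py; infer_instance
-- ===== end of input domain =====

-- B inverts the traversal: instead of renaming each fact key by a positional feature lookup,
-- it iterates over the zipped feature pairs once, patching a mutable key array at each source
-- key's position, then zips the patched keys back with the values (objective: faster, measured).


-- ===== PORT A =====
-- new_fact = {}; for key, value in fact.items():
--   if key in source_features and len(target_features) > list(source_features.keys()).index(key):
--     new_fact[list(target_features.keys())[idx]] = value  else: new_fact[key] = value
def adapt_fact_py (fact : List (String × Int)) (source_features : List (String × Int)) (target_features : List (String × Int)) : List (String × Int) :=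
  let src_keys := source_features.map Prod.fst
  let tgt_keys := target_features.map Prod.fst
  let new_fact : PySem.Dict String Int :=
    fact.foldl (fun nf kv =>
      match PySem.List.index? src_keys kv.1 with
      | some i =>
          if i < target_features.length then
            nf.insert (tgt_keys.getD i "") kv.2
          else
            nf.insert kv.1 kv.2
      | none => nf.insert kv.1 kv.2) PySem.Dict.empty
  new_fact.items

-- ===== PORT B =====
-- original_keys = list(fact); new_keys = list(fact)
-- for src_key, tgt_key in zip(source_features, target_features):
--   if src_key in fact: new_keys[original_keys.index(src_key)] = tgt_key
-- return dict(zip(new_keys, fact.values()))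
def adapt_fact_py_alt (fact : List (String × Int)) (source_features : List (String × Int)) (target_features : List (String × Int)) : List (String × Int) :=
  let original_keys := fact.map Prod.fst
  let new_keys :=
    ((source_features.map Prod.fst).zip (target_features.map Prod.fst)).foldl
      (fun ks (st : String × String) =>
        if original_keys.contains st.1 then
          -- list assignment new_keys[original_keys.index(src_key)] = tgt_key;
          -- under the membership guard index? always returns some, and the index is in range
          match PySem.List.index? original_keys st.1 with
          | some j => ks.set j st.2
          | none => ks
        else ks)
      (fact.map Prod.fst)
  ((new_keys.zip (fact.map Prod.snd)).foldl
      (fun (nf : PySem.Dict String Int) kv => nf.insert kv.1 kv.2) PySem.Dict.empty).items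

-- ===== PRECONDITION & SPEC =====
-- Pre_ excludes association lists whose fact part or source_features part has duplicate keys:
-- such lists do not represent any Python dict (the Python arguments are dicts), so no Python
-- input is excluded.
def Pre_adapt_fact_py (fact : List (String × Int)) (source_features : List (String × Int)) (target_features : List (String × Int)) : Prop :=
  (fact.map Prod.fst).Nodup ∧ (source_features.map Prod.fst).Nodup
instance (fact : List (String × Int)) (source_features : List (String × Int)) (target_features : List (String × Int)) : Decidable (Pre_adapt_fact_py fact source_features target_features) := by unfold Pre_adapt_fact_py; infer_instance

def pvWitness_adapt_fact_py : (List (String × Int)) × (List (String × Int)) × (List (String × Int)) :=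
  ([("a", 1), ("c", 3)], [("a", 0), ("b", 0)], [("x", 0), ("y", 0)])

def Spec_adapt_fact_py (fact : List (String × Int)) (source_features : List (String × Int)) (target_features : List (String × Int)) (out : List (String × Int)) : Prop := out = adapt_fact_py_alt fact source_features target_features
instance (fact : List (String × Int)) (source_features : List (String × Int)) (target_features : List (String × Int)) (out : List (String × Int)) : Decidable (Spec_adapt_fact_py fact source_features target_features out) := by unfold Spec_adapt_fact_py; infer_instance

-- ===== CLAIM (what is proved, stated in full; the proofs are below) =====
def Claim_equal_adapt_fact_py : Prop := ∀ (fact : List (String × Int)) (source_features : List (String × Int)) (target_features : List (String × Int)), Dom_adapt_fact_py fact source_features target_features → Pre_adapt_fact_py fact source_features target_features → Spec_adapt_fact_py fact source_features target_features (adapt_fact_py fact source_features target_features)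

-- ===== LEMMAS AND PROOFS =====

-- The renaming A applies to one key, as a function.
def pvRename (src_keys tgt_keys : List String) (k : String) : String :=
  match PySem.List.index? src_keys k with
  | some i => if i < tgt_keys.length then tgt_keys.getD i "" else k
  | none => k

-- B's patching step.
def pvPatch (orig : List String) (ks : List String) (st : String × String) : List String :=
  if orig.contains st.1 then
    match PySem.List.index? orig st.1 with
    | some j => ks.set j st.2
    | none => ks
  else ks

theorem length_foldl_pvPatch (orig : List String) (L : List (String × String)) (ks : List String) :
    (L.foldl (pvPatch orig) ks).length = ks.length := by
  induction L generalizing ks with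
  | nil => rfl
  | cons p L ih =>
    rw [List.foldl_cons, ih]
    unfold pvPatch
    split_ifs
    · cases PySem.List.index? orig p.1 <;> simp
    · rfl

theorem pvPatch_hit (orig ks : List String) (st : String × String) (j : Nat)
    (h : PySem.List.index? orig st.1 = some j) : pvPatch orig ks st = ks.set j st.2 := by
  have hm : orig.contains st.1 = true := by
    have : st.1 ∈ orig := (PySem.List.index?_isSome_iff orig st.1).mp (by rw [h]; rfl)
    simpa using this
  unfold pvPatch
  rw [if_pos hm, h]

-- A fold over pairs none of which hits position j leaves position j unchanged.
theorem foldl_pvPatch_untouched (orig : List String) (L : List (String × String)) (ks : List String)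
    (j : Nat) (h : ∀ p ∈ L, PySem.List.index? orig p.1 ≠ some j) :
    (L.foldl (pvPatch orig) ks)[j]? = ks[j]? := by
  induction L generalizing ks with
  | nil => rfl
  | cons p L ih =>
    rw [List.foldl_cons, ih _ (fun q hq => h q (List.mem_cons_of_mem p hq))]
    unfold pvPatch
    split_ifs
    · cases hidx : PySem.List.index? orig p.1 with
      | none => rfl
      | some j' =>
        have : j' ≠ j := fun he => h p (List.mem_cons_self) (he ▸ hidx)
        exact List.getElem?_set_ne this
    · rfl

-- In a Nodup list, the index of l[j] is j.
theorem index?_getElem_of_nodup (l : List String) (hnd : l.Nodup) (j : Nat) (hj : j < l.length) :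
    PySem.List.index? l l[j] = some j := by
  cases hidx : PySem.List.index? l l[j] with
  | none =>
    exact absurd (List.getElem_mem hj) ((PySem.List.index?_eq_none_iff l l[j]).mp hidx)
  | some i =>
    obtain ⟨hi, hval, -⟩ := PySem.List.getElem_of_index?_eq_some hidx
    exact congrArg some ((List.Nodup.getElem_inj_iff hnd).mp hval)

-- Core lemma: B's patched key list is A's rename applied pointwise.
theorem patched_keys_eq (fact source_features target_features : List (String × Int))
    (hf : (fact.map Prod.fst).Nodup) (hs : (source_features.map Prod.fst).Nodup) :
    ((source_features.map Prod.fst).zip (target_features.map Prod.fst)).foldl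
        (pvPatch (fact.map Prod.fst)) (fact.map Prod.fst)
      = (fact.map Prod.fst).map
          (pvRename (source_features.map Prod.fst) (target_features.map Prod.fst)) := by
  set orig := fact.map Prod.fst with horig
  set srcK := source_features.map Prod.fst with hsrc
  set tgtK := target_features.map Prod.fst with htgt
  set P := srcK.zip tgtK with hP
  apply List.ext_getElem?
  intro j
  by_cases hj : j < orig.length
  · have hPj : ∀ p ∈ P, PySem.List.index? orig p.1 = some j → p.1 = orig[j] := by
      intro p _ hidx
      obtain ⟨_, hval, -⟩ := PySem.List.getElem_of_index?_eq_some hidx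
      exact hval.symm
    rw [List.getElem?_map, List.getElem?_eq_getElem hj]
    simp only [Option.map_some]
    unfold pvRename
    cases hidx : PySem.List.index? srcK orig[j] with
    | none =>
      -- orig[j] not a source key: no pair touches j
      rw [foldl_pvPatch_untouched orig P orig j ?_, List.getElem?_eq_getElem hj]
      intro p hp he
      have h1 : p.1 = orig[j] := hPj p hp he
      have : p.1 ∈ srcK := (List.of_mem_zip hp).1
      rw [h1] at this
      exact (PySem.List.index?_eq_none_iff srcK orig[j]).mp hidx this
    | some i =>
      obtain ⟨hiS, hvalS, -⟩ := PySem.List.getElem_of_index?_eq_some hidx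
      by_cases hit : i < tgtK.length
      · -- the i-th zipped pair patches position j with tgtK[i]
        have hiP : i < P.length := by rw [hP, List.length_zip]; omega
        have hPi : P[i] = (srcK[i]'hiS, tgtK[i]'hit) := List.getElem_zip
        have hdec : P = P.take i ++ P[i] :: P.drop (i + 1) := by
          rw [← List.drop_eq_getElem_cons hiP, List.take_append_drop]
        simp only [if_pos hit]
        conv_lhs => rw [hdec]
        rw [List.foldl_append, List.foldl_cons]
        rw [foldl_pvPatch_untouched orig (P.drop (i+1)) _ j ?_]
        · have hidxo : PySem.List.index? orig P[i].1 = some j := by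
            rw [hPi]; simp only
            rw [hvalS]
            exact index?_getElem_of_nodup orig hf j hj
          rw [pvPatch_hit orig _ P[i] j hidxo]
          have hlen : ((P.take i).foldl (pvPatch orig) orig).length = orig.length :=
            length_foldl_pvPatch orig _ orig
          rw [List.getElem?_set_self (by rw [hlen]; exact hj), hPi]
          simp only
          rw [List.getD_eq_getElem tgtK "" hit]
        · -- no later pair hits j: its source key would equal srcK[i], contradicting Nodup
          intro p hp he
          obtain ⟨m, hm, hpm⟩ := List.getElem_of_mem hp
          have hm' : i + 1 + m < P.length := by
            rw [List.length_drop] at hm; omega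
          have hiS' : i + 1 + m < srcK.length := by
            rw [hP, List.length_zip] at hm'; omega
          have hiT' : i + 1 + m < tgtK.length := by
            rw [hP, List.length_zip] at hm'; omega
          have hp1 : p.1 = srcK[i+1+m]'hiS' := by
            rw [← hpm, List.getElem_drop]
            have : P[i+1+m]'hm' = (srcK[i+1+m]'hiS', tgtK[i+1+m]'hiT') := List.getElem_zip
            rw [this]
          have h1 : p.1 = orig[j] := hPj p (List.mem_of_mem_drop hp) he
          have : srcK[i]'hiS = srcK[i+1+m]'hiS' := by rw [hvalS, ← h1, hp1]
          have := (List.Nodup.getElem_inj_iff hs).mp this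
          omega
      · -- source index beyond target length: A keeps the key, and no pair can touch j
        simp only [if_neg hit]
        rw [foldl_pvPatch_untouched orig P orig j ?_, List.getElem?_eq_getElem hj]
        intro p hp he
        have h1 : p.1 = orig[j] := hPj p hp he
        obtain ⟨m, hm, hpm⟩ := List.getElem_of_mem hp
        have hmS : m < srcK.length := by rw [hP, List.length_zip] at hm; omega
        have hmT : m < tgtK.length := by rw [hP, List.length_zip] at hm; omega
        have hp1 : p.1 = srcK[m]'hmS := by
          rw [← hpm]
          have : P[m]'hm = (srcK[m]'hmS, tgtK[m]'hmT) := List.getElem_zip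
          rw [this]
        have : srcK[i]'hiS = srcK[m]'hmS := by rw [hvalS, ← h1, hp1]
        have := (List.Nodup.getElem_inj_iff hs).mp this
        omega
  · rw [List.getElem?_eq_none, List.getElem?_eq_none]
    · rw [List.length_map]; omega
    · rw [length_foldl_pvPatch]; omega

-- ===== VERDICT (by name: the statement is the Claim_ definition above) =====
theorem adapt_fact_py_spec : Claim_equal_adapt_fact_py := by
  intro fact source_features target_features _ hpre
  obtain ⟨hf, hs⟩ := hpre
  unfold Spec_adapt_fact_py adapt_fact_py adapt_fact_py_alt
  dsimp only
  have hpatch : ((source_features.map Prod.fst).zip (target_features.map Prod.fst)).foldl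
      (fun ks (st : String × String) =>
        if (fact.map Prod.fst).contains st.1 then
          match PySem.List.index? (fact.map Prod.fst) st.1 with
          | some j => ks.set j st.2
          | none => ks
        else ks) (fact.map Prod.fst)
      = (fact.map Prod.fst).map
          (pvRename (source_features.map Prod.fst) (target_features.map Prod.fst)) :=
    patched_keys_eq fact source_features target_features hf hs
  rw [hpatch]
  congr 1
  rw [List.map_map, List.zip_map', List.foldl_map]
  apply PySem.List.foldl_congr_mem
  intro nf kv _
  simp only [Function.comp]
  unfold pvRename
  cases hidx : PySem.List.index? (source_features.map Prod.fst) kv.1 with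
  | none => rfl
  | some i =>
    by_cases hi : i < target_features.length
    · simp [hi]
    · simp [hi]
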